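-- pv_equiv track=rewrite | github.com/moosway/cs61a-20fa | cs61a/proj/hog/Untitled-1.py | swine_align
-- ===== SOURCE A (Python) =====
-- def swine_align(player_score, opponent_score):
--     """Return whether the player gets an extra turn due to Swine Align.
--
--     player_score:   The total score of the current player.
--     opponent_score: The total score of the other player.
--
--     >>> swine_align(30, 45)  # The GCD is 15.
--     True
--     >>> swine_align(35, 45)  # The GCD is 5.
--     False
--     """
--     # BEGIN PROBLEM 4a
--     if player_score>=opponent_score:
--         min,max=opponent_score,player_score
--     else:
--         max,min=opponent_score,player_score
--     if min<10:
--         return False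
--     for i in range(min,9,-1):
--         if max%i==0:
--             if min%i==0:
--                 return True
--     return False
-- ===== SOURCE B (Python) =====
-- def swine_align(player_score, opponent_score):
--     """Extra turn iff both scores are at least 10 and they share a
--     common divisor of at least 10 (i.e. gcd >= 10)."""
--     if min(player_score, opponent_score) < 10:
--         return False
--     a, b = player_score, opponent_score
--     while b:
--         a, b = b, a % b
--     return a >= 10
-- ===== Notes on version B (the rewrite author's own statement) =====
-- stated objective: faster
-- what changed: Replaces A's downward trial-division scan over range(min,9,-1) testing divisibility of both scores by an explicit Euclidean-remainder loop computing the gcd, then compares it to 10.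
import Mathlib
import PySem

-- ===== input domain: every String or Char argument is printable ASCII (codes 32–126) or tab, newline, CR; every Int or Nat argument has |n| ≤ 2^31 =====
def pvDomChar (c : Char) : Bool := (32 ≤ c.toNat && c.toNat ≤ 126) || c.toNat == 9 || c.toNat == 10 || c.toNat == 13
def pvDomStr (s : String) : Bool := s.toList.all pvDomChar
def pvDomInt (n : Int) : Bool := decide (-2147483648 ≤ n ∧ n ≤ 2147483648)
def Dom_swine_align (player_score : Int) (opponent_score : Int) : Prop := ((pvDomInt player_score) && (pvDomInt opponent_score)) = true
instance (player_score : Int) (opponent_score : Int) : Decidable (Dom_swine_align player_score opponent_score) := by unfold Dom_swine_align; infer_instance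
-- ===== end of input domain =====

-- B replaces A's downward trial-division scan by an explicit Euclidean-remainder gcd loop (asymptotically faster).


-- ===== PORT A =====
-- The early-returning for-loop over range(min, 9, -1) is rendered as List.any over
-- PySem.List.pyRange min 9 (-1): same iterates, same tests, first success returns True.
def swine_align (player_score : Int) (opponent_score : Int) : Bool :=
  let mnmx : Int × Int :=
    if player_score ≥ opponent_score then (opponent_score, player_score)
    else (player_score, opponent_score)
  let mn := mnmx.1
  let mx := mnmx.2
  if mn < 10 then false
  else
    (PySem.List.pyRange mn 9 (-1)).any
      (fun i => PySem.Int.mod mx i == 0 && PySem.Int.mod mn i == 0)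

-- ===== PORT B =====
-- The Python `while b: a, b = b, a % b` loop; terminates because |b| strictly decreases.
def pvEuclid (a b : Int) : Int :=
  if _hb : b = 0 then a else pvEuclid b (PySem.Int.mod a b)
termination_by b.natAbs
decreasing_by
  rcases lt_trichotomy b 0 with h | h | h
  · have := PySem.Int.mod_neg_bounds a h; omega
  · exact absurd h _hb
  · have h1 := PySem.Int.mod_nonneg a h
    have h2 := PySem.Int.mod_lt a h
    omega

def swine_align_alt (player_score : Int) (opponent_score : Int) : Bool :=
  if min player_score opponent_score < 10 then false
  else pvEuclid player_score opponent_score ≥ 10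

-- ===== PRECONDITION & SPEC =====
def Spec_swine_align (player_score : Int) (opponent_score : Int) (out : Bool) : Prop := out = swine_align_alt player_score opponent_score
instance (player_score : Int) (opponent_score : Int) (out : Bool) : Decidable (Spec_swine_align player_score opponent_score out) := by unfold Spec_swine_align; infer_instance

-- ===== CLAIM (what is proved, stated in full; the proofs are below) =====
def Claim_equal_swine_align : Prop := ∀ (player_score : Int) (opponent_score : Int), Dom_swine_align player_score opponent_score → Spec_swine_align player_score opponent_score (swine_align player_score opponent_score)

-- ===== LEMMAS AND PROOFS =====

-- B's loop computes the (nonnegative) gcd.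
theorem pvEuclid_eq_gcd (a b : Int) (ha : 0 ≤ a) (hb : 0 ≤ b) :
    pvEuclid a b = Int.gcd a b := by
  induction a, b using pvEuclid.induct with
  | case1 a =>
    rw [pvEuclid]
    simp [Int.gcd, Int.natAbs_of_nonneg ha]
  | case2 a b h ih =>
    have hbpos : 0 < b := lt_of_le_of_ne hb (Ne.symm h)
    rw [pvEuclid]
    simp only [h, dite_false]
    rw [ih hb (PySem.Int.mod_nonneg a hbpos)]
    rw [PySem.Int.mod_eq_emod_of_pos hbpos]
    rw [Int.gcd_comm, Int.gcd_emod]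

-- A's scan succeeds iff some i with 10 ≤ i ≤ mn divides both.
theorem scan_iff (mn mx : Int) :
    ((PySem.List.pyRange mn 9 (-1)).any
      (fun i => PySem.Int.mod mx i == 0 && PySem.Int.mod mn i == 0)) = true ↔
    ∃ i : Int, 10 ≤ i ∧ i ≤ mn ∧ i ∣ mx ∧ i ∣ mn := by
  rw [List.any_eq_true]
  constructor
  · rintro ⟨i, hmem, hp⟩
    rw [PySem.List.mem_pyRange_neg_one] at hmem
    simp only [Bool.and_eq_true, beq_iff_eq, PySem.Int.mod_eq_zero_iff_dvd] at hp
    exact ⟨i, by omega, by omega, hp.1, hp.2⟩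
  · rintro ⟨i, h10, hle, d1, d2⟩
    refine ⟨i, ?_, ?_⟩
    · rw [PySem.List.mem_pyRange_neg_one]; omega
    · simp only [Bool.and_eq_true, beq_iff_eq, PySem.Int.mod_eq_zero_iff_dvd]
      exact ⟨d1, d2⟩

-- ∃ common divisor ≥ 10 iff gcd ≥ 10, for 0 < mn.
theorem exists_div_iff_gcd (mn mx : Int) (hmn : 0 < mn) :
    (∃ i : Int, 10 ≤ i ∧ i ≤ mn ∧ i ∣ mx ∧ i ∣ mn) ↔ 10 ≤ (Int.gcd mn mx : Int) := by
  constructor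
  · rintro ⟨i, h10, _, dmx, dmn⟩
    have hdvd : i ∣ (Int.gcd mn mx : Int) := Int.dvd_coe_gcd dmn dmx
    have hgpos : 0 < (Int.gcd mn mx : Int) := by
      have : Int.gcd mn mx ≠ 0 := by
        simp [Int.gcd_eq_zero_iff]; omega
      positivity
    calc (10 : Int) ≤ i := h10
      _ ≤ _ := Int.le_of_dvd hgpos hdvd
  · intro hg
    refine ⟨Int.gcd mn mx, hg, ?_, Int.gcd_dvd_right mn mx, Int.gcd_dvd_left mn mx⟩
    exact Int.le_of_dvd hmn (Int.gcd_dvd_left mn mx)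

-- On the min ≥ 10 branch, A's scan equals "gcd ≥ 10".
theorem branch_eq (mn mx : Int) (h10 : 10 ≤ mn) :
    ((PySem.List.pyRange mn 9 (-1)).any
      (fun i => PySem.Int.mod mx i == 0 && PySem.Int.mod mn i == 0))
    = decide ((Int.gcd mn mx : Int) ≥ 10) := by
  rw [Bool.eq_iff_iff, decide_eq_true_iff, scan_iff,
      exists_div_iff_gcd mn mx (by omega)]

-- ===== VERDICT (by name: the statement is the Claim_ definition above) =====
theorem swine_align_spec : Claim_equal_swine_align := by
  intro p o _
  unfold Spec_swine_align swine_align swine_align_alt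
  by_cases hge : p ≥ o
  · simp only [hge, if_pos]
    by_cases hlt : o < 10
    · simp [hlt, min_def]; omega
    · have hmin : min p o = o := by omega
      simp only [hmin, hlt, if_false]
      rw [pvEuclid_eq_gcd p o (by omega) (by omega), Int.gcd_comm p o,
          branch_eq o p (by omega)]
  · simp only [hge, if_false]
    by_cases hlt : p < 10
    · simp [hlt, min_def]; omega
    · have hmin : min p o = p := by omega
      simp only [hmin, hlt, if_false]
      rw [pvEuclid_eq_gcd p o (by omega) (by omega), branch_eq p o (by omega)]
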